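-- pv_equiv track=rewrite | github.com/sybeom528/code_kata | programmers/L0_기초입문/입문/043_개미_군단.py | solution
-- ===== SOURCE A (Python) =====
-- def solution(hp):
--     answer = 0
--     chk_zero = False
--     for num in [5,3,1]:
--         if hp % 5 == 0:
--             answer += (hp // num)
--             chk_zero = True
--             break
--         else:
--             answer += (hp // num)
--             hp = hp % num
--
--         if chk_zero:
--             break
--
--     return answer
-- ===== SOURCE B (Python) =====
-- def solution(hp):
--     return hp // 5 + (hp % 5) // 3 + (hp % 5) % 3
-- ===== Notes on version B (the rewrite author's own statement) =====
-- stated objective: simpler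
-- what changed: Replaced the loop over [5,3,1] with break flags and in-place mutation of hp by a single closed-form arithmetic expression hp//5 + (hp%5)//3 + (hp%5)%3.
import Mathlib
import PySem

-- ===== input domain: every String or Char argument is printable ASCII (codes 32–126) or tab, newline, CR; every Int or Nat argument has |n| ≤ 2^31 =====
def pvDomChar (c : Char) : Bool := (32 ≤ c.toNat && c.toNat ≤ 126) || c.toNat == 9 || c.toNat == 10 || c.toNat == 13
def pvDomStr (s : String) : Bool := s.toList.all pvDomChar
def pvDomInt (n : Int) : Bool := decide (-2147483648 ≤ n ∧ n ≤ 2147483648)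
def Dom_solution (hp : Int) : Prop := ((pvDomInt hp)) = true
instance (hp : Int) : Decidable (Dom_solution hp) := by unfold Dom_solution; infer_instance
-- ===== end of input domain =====

-- ===== PORT A =====
-- A: loop over [5,3,1] with an accumulator, in-place hp mutation and break flags.
-- Break is modelled with a 'done' flag; once done, the state is unchanged.
def solutionStep (st : Int × Int × Bool × Bool) (num : Int) : Int × Int × Bool × Bool :=
  let (answer, hp, chkZero, done) := st
  if done then st
  else if PySem.Int.mod hp 5 = 0 then
    (answer + PySem.Int.floordiv hp num, hp, true, true)   -- break
  else
    let answer := answer + PySem.Int.floordiv hp num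
    let hp := PySem.Int.mod hp num
    if chkZero then (answer, hp, chkZero, true) else (answer, hp, chkZero, done)

def solution (hp : Int) : Int :=
  (List.foldl solutionStep (0, hp, false, false) [5, 3, 1]).1

-- ===== PORT B =====
-- B: closed form, no loop.
def solution_alt (hp : Int) : Int :=
  PySem.Int.floordiv hp 5 + PySem.Int.floordiv (PySem.Int.mod hp 5) 3
    + PySem.Int.mod (PySem.Int.mod hp 5) 3

-- ===== PRECONDITION & SPEC =====
def Spec_solution (hp : Int) (out : Int) : Prop := out = solution_alt hp
instance (hp : Int) (out : Int) : Decidable (Spec_solution hp out) := by unfold Spec_solution; infer_instance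

-- ===== CLAIM (what is proved, stated in full; the proofs are below) =====
def Claim_equal_solution : Prop := ∀ (hp : Int), Dom_solution hp → Spec_solution hp (solution hp)

-- ===== LEMMAS AND PROOFS =====

-- ===== VERDICT (by name: the statement is the Claim_ definition above) =====
theorem solution_spec : Claim_equal_solution := by
  intro hp _
  unfold Spec_solution solution solution_alt
  simp only [List.foldl]
  by_cases h : hp % 5 = 0
  · simp [solutionStep, h]
  · by_cases h3 : ((hp % 5) % 3) % 5 = 0
    · simp [solutionStep, h, h3]
    · simp [solutionStep, h, h3]
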